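-- pv_equiv track=rewrite | github.com/AlxndrJhn/adventofcode2023 | 05/day05_2.py | get_next_interval
-- ===== SOURCE A (Python) =====
-- def get_next_interval(key, mapping):
--     smallest_dist = float("inf")
--     smallest_interval = None
--     smallest_dst = None
--     for intervals, dst in mapping.items():
--         if key < intervals[0]:
--             if intervals[0] - key < smallest_dist:
--                 smallest_dist = intervals[0] - key
--                 smallest_interval = intervals
--                 smallest_dst = dst
--             continue
--         if key > intervals[1]:
--             continue
--         raise Exception("This should not happen")
--     return smallest_interval, smallest_dst
-- ===== SOURCE B (Python) =====
-- def get_next_interval(key, mapping):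
--     candidates = []
--     for intervals, dst in mapping.items():
--         if key < intervals[0]:
--             candidates.append((intervals, dst))
--         elif key > intervals[1]:
--             continue
--         else:
--             raise Exception("This should not happen")
--     if not candidates:
--         return None, None
--     best = min(candidates, key=lambda c: c[0][0])
--     return best[0], best[1]
-- ===== Notes on version B (the rewrite author's own statement) =====
-- stated objective: idiomatic
-- what changed: Replaces the hand-maintained running-minimum triple (smallest_dist/interval/dst) with a collect-then-select pass: validate and gather candidate entries, then pick the best with min(..., key=...).
import Mathlib
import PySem

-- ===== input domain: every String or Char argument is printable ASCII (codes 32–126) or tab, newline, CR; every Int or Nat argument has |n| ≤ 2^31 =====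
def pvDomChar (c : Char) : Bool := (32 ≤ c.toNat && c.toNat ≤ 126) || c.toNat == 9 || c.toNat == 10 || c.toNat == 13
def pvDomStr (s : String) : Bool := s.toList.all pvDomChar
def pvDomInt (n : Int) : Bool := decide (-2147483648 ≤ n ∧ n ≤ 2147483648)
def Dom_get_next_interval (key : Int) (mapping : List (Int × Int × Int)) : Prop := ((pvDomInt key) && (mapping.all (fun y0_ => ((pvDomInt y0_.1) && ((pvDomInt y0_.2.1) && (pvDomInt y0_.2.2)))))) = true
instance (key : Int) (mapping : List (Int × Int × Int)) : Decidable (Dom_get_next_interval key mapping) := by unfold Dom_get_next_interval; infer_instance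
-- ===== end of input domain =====

-- B replaces A's running-minimum accumulator triple with collect-candidates-then-min (idiomatic decomposition).

-- ===== PORT A =====
-- float("inf") initial value is modeled as `none`; `a - key < none` is true.
def pvDistLt (x : Int) : Option Int → Bool
  | none => true
  | some m => x < m

-- A's loop, carrying (smallest_dist, smallest_interval, smallest_dst).
-- The `raise` branch (intervals[0] ≤ key ≤ intervals[1]) is excluded by Pre_;
-- the port returns the current accumulators there (unreachable under Pre_).
def getNextLoopA (key : Int) : List (Int × Int × Int) → Option Int → Option (Int × Int) →
    Option Int → (Option (Int × Int)) × Option Int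
  | [], _, si, sd => (si, sd)
  | (a, b, d) :: rest, dist, si, sd =>
    if key < a then
      if pvDistLt (a - key) dist then
        getNextLoopA key rest (some (a - key)) (some (a, b)) (some d)
      else
        getNextLoopA key rest dist si sd
    else if key > b then
      getNextLoopA key rest dist si sd
    else
      (si, sd)

def get_next_interval (key : Int) (mapping : List (Int × Int × Int)) : (Option (Int × Int)) × Option Int :=
  getNextLoopA key mapping none none none

-- ===== PORT B =====
-- B's collection loop; `raise` branch (outside Pre_) returns [].
def collectB (key : Int) : List (Int × Int × Int) → List ((Int × Int) × Int)
  | [] => []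
  | (a, b, d) :: rest =>
    if key < a then ((a, b), d) :: collectB key rest
    else if key > b then collectB key rest
    else []

def get_next_interval_alt (key : Int) (mapping : List (Int × Int × Int)) : (Option (Int × Int)) × Option Int :=
  let candidates := collectB key mapping
  match PySem.List.min? candidates (fun c => c.1.1) with
  | none => (none, none)
  | some best => (some best.1, some best.2)

-- ===== PRECONDITION & SPEC =====
-- Pre_ excludes exactly the mappings containing an interval with a ≤ key ≤ b:
-- there both A and B raise Exception("This should not happen").
def Pre_get_next_interval (key : Int) (mapping : List (Int × Int × Int)) : Prop :=
  ∀ t ∈ mapping, key < t.1 ∨ t.2.1 < key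
instance (key : Int) (mapping : List (Int × Int × Int)) : Decidable (Pre_get_next_interval key mapping) := by
  unfold Pre_get_next_interval; infer_instance
def pvWitness_get_next_interval : Int × (List (Int × Int × Int)) := (5, [(10, 20, 3), (1, 2, 7)])
def Spec_get_next_interval (key : Int) (mapping : List (Int × Int × Int)) (out : (Option (Int × Int)) × Option Int) : Prop := out = get_next_interval_alt key mapping
instance (key : Int) (mapping : List (Int × Int × Int)) (out : (Option (Int × Int)) × Option Int) : Decidable (Spec_get_next_interval key mapping out) := by unfold Spec_get_next_interval; infer_instance

-- ===== CLAIM (what is proved, stated in full; the proofs are below) =====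
def Claim_equal_get_next_interval : Prop := ∀ (key : Int) (mapping : List (Int × Int × Int)), Dom_get_next_interval key mapping → Pre_get_next_interval key mapping → Spec_get_next_interval key mapping (get_next_interval key mapping)

-- ===== LEMMAS AND PROOFS =====

-- min?'s accumulator step (first minimal element), spelled out.
def minStep (k : ((Int × Int) × Int) → Int) (acc : Option ((Int × Int) × Int))
    (x : ((Int × Int) × Int)) : Option ((Int × Int) × Int) :=
  match acc with
  | none => some x
  | some m => if k x < k m then some x else some m

theorem min?_eq_foldl (l : List ((Int × Int) × Int)) (k : ((Int × Int) × Int) → Int) :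
    PySem.List.min? l k = l.foldl (minStep k) none := by
  unfold PySem.List.min?
  congr 1
  funext acc x
  cases acc <;> simp [minStep]

def finishB : Option ((Int × Int) × Int) → (Option (Int × Int)) × Option Int
  | none => (none, none)
  | some best => (some best.1, some best.2)

-- The loop invariant: A's loop from an accumulator state corresponding to `acc`
-- computes the first-minimum fold over the remaining candidates.
theorem loopA_invariant (key : Int) (l : List (Int × Int × Int))
    (hpre : ∀ t ∈ l, key < t.1 ∨ t.2.1 < key) (acc : Option ((Int × Int) × Int)) :
    getNextLoopA key l (acc.map fun c => c.1.1 - key) (acc.map Prod.fst) (acc.map Prod.snd)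
      = finishB (List.foldl (minStep (fun c => c.1.1)) acc (collectB key l)) := by
  induction l generalizing acc with
  | nil => cases acc <;> simp [getNextLoopA, collectB, finishB]
  | cons hd tl ih =>
    obtain ⟨a, b, d⟩ := hd
    have hhd := hpre (a, b, d) (by simp)
    have htl : ∀ t ∈ tl, key < t.1 ∨ t.2.1 < key := fun t ht => hpre t (List.mem_cons_of_mem _ ht)
    by_cases hka : key < a
    · cases acc with
      | none =>
        simpa [getNextLoopA, collectB, hka, pvDistLt, minStep]
          using ih htl (some ((a, b), d))
      | some m =>
        by_cases hlt : a - key < m.1.1 - key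
        · have hlt' : a < m.1.1 := by omega
          simpa [getNextLoopA, collectB, hka, pvDistLt, hlt, minStep, hlt']
            using ih htl (some ((a, b), d))
        · have hlt' : ¬ a < m.1.1 := by omega
          simpa [getNextLoopA, collectB, hka, pvDistLt, hlt, minStep, hlt']
            using ih htl (some m)
    · have hkb : b < key := by simp at hhd; omega
      have hkb' : key > b := hkb
      simpa [getNextLoopA, collectB, hka, hkb', minStep] using ih htl acc

theorem loopA_none (key : Int) (mapping : List (Int × Int × Int))
    (hpre : ∀ t ∈ mapping, key < t.1 ∨ t.2.1 < key) :
    getNextLoopA key mapping none none none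
      = finishB (List.foldl (minStep (fun c => c.1.1)) none (collectB key mapping)) := by
  simpa using loopA_invariant key mapping hpre none

-- ===== VERDICT (by name: the statement is the Claim_ definition above) =====
theorem get_next_interval_spec : Claim_equal_get_next_interval := by
  intro key mapping _ hpre
  show get_next_interval key mapping = get_next_interval_alt key mapping
  unfold get_next_interval get_next_interval_alt
  rw [loopA_none key mapping hpre]
  simp only [min?_eq_foldl]
  cases List.foldl (minStep fun c => c.1.1) none (collectB key mapping) <;> rfl
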